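-- pv_equiv track=rewrite | github.com/Krithigha24/Reflector-Calibration | intern_ws/src/calibration/src/cluster.py | find_label_indices
-- ===== SOURCE A (Python) =====
-- def find_label_indices(input_array):
--     indices = {}
--
--     label = None
--     start_index = None
--     end_index = None
--
--     for i in range(len(input_array)):
--         if input_array[i] != -1:
--             if label is None:
--                 label = input_array[i]
--                 start_index = i
--                 end_index = i
--             elif input_array[i] == label:
--                 end_index = i
--             else:
--                 indices[label] = (start_index, end_index)
--                 label = input_array[i]
--                 start_index = i
--                 end_index = i
--
--     if label is not None:
--         indices[label] = (start_index, end_index)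
--
--     return indices
-- ===== SOURCE B (Python) =====
-- def find_label_indices(input_array):
--     # Filter-then-group: keep (index, value) pairs with value != -1, then chop
--     # the pair list into maximal runs of equal values and record each run's span.
--     pairs = [(i, v) for i, v in enumerate(input_array) if v != -1]
--     indices = {}
--     n = len(pairs)
--     k = 0
--     while k < n:
--         j = k
--         while j + 1 < n and pairs[j + 1][1] == pairs[k][1]:
--             j += 1
--         start, value = pairs[k]
--         indices[value] = (start, pairs[j][0])
--         k = j + 1
--     return indices
-- ===== Notes on version B (the rewrite author's own statement) =====
-- stated objective: alternative
-- what changed: Replaces A's incremental flush-on-change state machine (label/start/end mutable state with a trailing flush) by a filter-then-group pipeline: build the (index,value) pairs with value != -1 once, then chop that list into maximal runs of equal values and record each run's span directly.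
import Mathlib
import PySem

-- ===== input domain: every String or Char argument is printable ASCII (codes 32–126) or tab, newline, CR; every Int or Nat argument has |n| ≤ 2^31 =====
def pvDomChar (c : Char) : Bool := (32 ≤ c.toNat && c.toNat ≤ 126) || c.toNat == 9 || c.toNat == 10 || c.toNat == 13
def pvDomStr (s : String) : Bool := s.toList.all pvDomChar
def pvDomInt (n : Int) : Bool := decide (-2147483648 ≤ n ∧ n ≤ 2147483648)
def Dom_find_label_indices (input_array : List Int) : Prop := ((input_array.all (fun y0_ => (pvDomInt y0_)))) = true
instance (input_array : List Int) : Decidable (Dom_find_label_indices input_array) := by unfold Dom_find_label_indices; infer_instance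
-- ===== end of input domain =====

-- B replaces A's flush-on-change state machine by a filter-then-group pipeline (alternative decomposition, same cost).

-- ===== PORT A =====
-- A's loop body: the state is (indices, label, start_index, end_index); label/start/end are None initially.
def pvStepA (st : PySem.Dict Int (Int × Int) × Option Int × Option Int × Option Int)
    (p : Int × Int) : PySem.Dict Int (Int × Int) × Option Int × Option Int × Option Int :=
  if p.2 ≠ -1 then
    match st with
    | (indices, none, _, _) => (indices, some p.2, some p.1, some p.1)
    | (indices, some l, s, e) =>
      if p.2 = l then (indices, some l, s, some p.1)
      else (indices.insert l (s.getD 0, e.getD 0), some p.2, some p.1, some p.1)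
  else st

-- A's trailing flush ("if label is not None: indices[label] = (start_index, end_index)")
def pvFinishA (st : PySem.Dict Int (Int × Int) × Option Int × Option Int × Option Int) :
    PySem.Dict Int (Int × Int) :=
  match st with
  | (indices, some l, s, e) => indices.insert l (s.getD 0, e.getD 0)
  | (indices, none, _, _) => indices

def find_label_indices (input_array : List Int) : List (Int × Int × Int) :=
  (pvFinishA ((PySem.List.enumerate input_array).foldl pvStepA (PySem.Dict.empty, none, none, none))).items

-- ===== PORT B =====
-- chop the filtered pair list into maximal runs of equal values: (value, first index, last index)
def pvChop : List (Int × Int) → List (Int × Int × Int)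
  | [] => []
  | (i, v) :: rest =>
      (v, i, ((rest.takeWhile (fun p => p.2 == v)).getLastD (i, v)).1) ::
        pvChop (rest.dropWhile (fun p => p.2 == v))
  termination_by pairs => pairs.length
  decreasing_by
    have := List.length_dropWhile_le (p := fun p => p.2 == v) (l := rest)
    simp; omega

def find_label_indices_alt (input_array : List Int) : List (Int × Int × Int) :=
  let pairs := (PySem.List.enumerate input_array).filter (fun p => p.2 ≠ -1)
  ((pvChop pairs).foldl (fun (d : PySem.Dict Int (Int × Int)) r => d.insert r.1 r.2)
    PySem.Dict.empty).items

-- ===== PRECONDITION & SPEC =====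
def Spec_find_label_indices (input_array : List Int) (out : List (Int × Int × Int)) : Prop := out = find_label_indices_alt input_array
instance (input_array : List Int) (out : List (Int × Int × Int)) : Decidable (Spec_find_label_indices input_array out) := by unfold Spec_find_label_indices; infer_instance

-- ===== CLAIM (what is proved, stated in full; the proofs are below) =====
def Claim_equal_find_label_indices : Prop := ∀ (input_array : List Int), Dom_find_label_indices input_array → Spec_find_label_indices input_array (find_label_indices input_array)

-- ===== LEMMAS AND PROOFS =====

-- pvChop with an open run (l, s, e) prepended: A's state machine computes exactly this.
def pvChopOpen (l s e : Int) : List (Int × Int) → List (Int × Int × Int)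
  | [] => [(l, s, e)]
  | (i, v) :: rest =>
      if v = l then pvChopOpen l s i rest else (l, s, e) :: pvChopOpen v i i rest

lemma pvChopOpen_eq (pairs : List (Int × Int)) : ∀ (l s e : Int),
    pvChopOpen l s e pairs =
      (l, s, ((pairs.takeWhile (fun p => p.2 == l)).getLastD (e, l)).1) ::
        pvChop (pairs.dropWhile (fun p => p.2 == l)) := by
  induction pairs with
  | nil => intro l s e; simp [pvChopOpen, pvChop]
  | cons p rest ih =>
    intro l s e
    obtain ⟨i, v⟩ := p
    by_cases hv : v = l
    · subst hv
      simp only [pvChopOpen, ih, List.takeWhile_cons, List.dropWhile_cons,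
        if_true, List.cons.injEq, Prod.mk.injEq, true_and]
      cases List.takeWhile (fun p => p.2 == v) rest <;> simp [List.getLastD]
    · simp [pvChopOpen, hv, pvChop, ih]

lemma pvChop_cons (i v : Int) (rest : List (Int × Int)) :
    pvChop ((i, v) :: rest) = pvChopOpen v i i rest := by
  rw [pvChopOpen_eq]
  simp [pvChop]

-- A's loop skips v = -1 entries entirely, so it equals the loop over the filtered list.
lemma foldl_stepA_filter (xs : List (Int × Int)) :
    ∀ st, xs.foldl pvStepA st = (xs.filter (fun p => p.2 ≠ -1)).foldl pvStepA st := by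
  induction xs with
  | nil => intro st; rfl
  | cons p rest ih =>
    intro st
    by_cases hp : p.2 = -1
    · simp [hp, List.foldl_cons, pvStepA, ih]
    · simp [hp, List.foldl_cons, ih]

-- Main invariant: from an open-run state, A's flushed result is B's fold over pvChopOpen.
lemma pvMain (pairs : List (Int × Int)) : ∀ (d : PySem.Dict Int (Int × Int)) (l s e : Int),
    (∀ p ∈ pairs, p.2 ≠ -1) →
    pvFinishA (pairs.foldl pvStepA (d, some l, some s, some e)) =
      (pvChopOpen l s e pairs).foldl (fun d r => d.insert r.1 r.2) d := by
  induction pairs with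
  | nil => intro d l s e _; simp [pvFinishA, pvChopOpen]
  | cons p rest ih =>
    intro d l s e h
    obtain ⟨i, v⟩ := p
    have hv : v ≠ -1 := h (i, v) (List.mem_cons_self ..)
    have hrest : ∀ p ∈ rest, p.2 ≠ -1 := fun p hp => h p (List.mem_cons_of_mem _ hp)
    by_cases hl : v = l
    · subst hl
      simp [List.foldl_cons, pvStepA, hv, pvChopOpen, ih _ _ _ _ hrest]
    · simp [List.foldl_cons, pvStepA, hv, hl, pvChopOpen, ih _ _ _ _ hrest]

lemma pvMainNone (pairs : List (Int × Int)) (d : PySem.Dict Int (Int × Int))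
    (h : ∀ p ∈ pairs, p.2 ≠ -1) :
    pvFinishA (pairs.foldl pvStepA (d, none, none, none)) =
      (pvChop pairs).foldl (fun d r => d.insert r.1 r.2) d := by
  cases pairs with
  | nil => simp [pvFinishA, pvChop]
  | cons p rest =>
    obtain ⟨i, v⟩ := p
    have hv : v ≠ -1 := h (i, v) (List.mem_cons_self ..)
    have hrest : ∀ p ∈ rest, p.2 ≠ -1 := fun p hp => h p (List.mem_cons_of_mem _ hp)
    rw [pvChop_cons]
    simp [List.foldl_cons, pvStepA, hv, pvMain rest d v i i hrest]

-- ===== VERDICT (by name: the statement is the Claim_ definition above) =====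
theorem find_label_indices_spec : Claim_equal_find_label_indices := by
  intro input_array _
  unfold Spec_find_label_indices find_label_indices find_label_indices_alt
  rw [foldl_stepA_filter]
  rw [pvMainNone _ _ (by intro p hp; simpa using (List.of_mem_filter hp))]
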